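-- pv_equiv track=rewrite | github.com/monarch-initiative/monochrom | src/ontology/monochrom/monochrom.py | get_parent_band_name
-- ===== SOURCE A (Python) =====
-- BAND_LOCALNAME = str
--
-- def get_parent_band_name(s: BAND_LOCALNAME):
--     if s == '':
--         return None
--     s2 = s[0:-1]
--     if s2 == '':
--         return ''
--     elif s2.endswith('.'):
--         return get_parent_band_name(s2)
--     else:
--         return s2
-- ===== SOURCE B (Python) =====
-- def get_parent_band_name(s):
--     if s == '':
--         return None
--     t = s[:-1]
--     while t.endswith('.'):
--         t = t[:-1]
--     return t
-- ===== Notes on version B (the rewrite author's own statement) =====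
-- stated objective: simpler
-- what changed: Replaces the tail recursion (which re-enters the function and re-checks the empty guard each step) with a single strip of the last character followed by an iterative while-loop removing trailing dots.
import Mathlib
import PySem

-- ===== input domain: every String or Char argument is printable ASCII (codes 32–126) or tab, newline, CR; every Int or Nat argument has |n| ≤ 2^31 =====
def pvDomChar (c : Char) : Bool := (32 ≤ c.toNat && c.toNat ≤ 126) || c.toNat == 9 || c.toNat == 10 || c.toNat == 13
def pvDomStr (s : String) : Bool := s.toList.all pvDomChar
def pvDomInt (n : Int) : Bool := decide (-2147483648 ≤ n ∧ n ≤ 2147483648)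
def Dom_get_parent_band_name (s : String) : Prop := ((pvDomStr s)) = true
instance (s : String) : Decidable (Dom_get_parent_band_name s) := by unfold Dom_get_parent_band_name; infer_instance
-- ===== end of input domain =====

-- B replaces A's tail recursion by one strip of the last character plus an iterative trailing-dot loop (objective: simpler).


-- ===== PORT A =====
-- A's recursion, on the code-point list (Str operations are wrappers over Chars/List ones)
def pvGetA (l : List Char) : Option (List Char) :=
  if l = [] then none
  else
    let l2 := PySem.List.slice l (some 0) (some (-1))   -- s[0:-1]
    if l2 = [] then some []
    else if PySem.Chars.endswith l2 ['.'] then pvGetA l2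
    else some l2
termination_by l.length
decreasing_by
  simp only [PySem.List.slice_zero_start, PySem.List.slice_to_neg_one, List.length_dropLast]
  have : 0 < l.length := List.length_pos_iff.mpr (by assumption)
  omega

def get_parent_band_name (s : String) : Option String :=
  (pvGetA s.toList).map String.ofList

-- ===== PORT B =====
-- the while-loop: strip trailing dots
def pvStripDots (t : List Char) : List Char :=
  if PySem.Chars.endswith t ['.'] then
    pvStripDots (PySem.List.slice t none (some (-1)))   -- t[:-1]
  else t
termination_by t.length
decreasing_by
  simp only [PySem.List.slice_to_neg_one, List.length_dropLast]
  have h : PySem.Chars.endswith t ['.'] = true := by assumption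
  have ht : t ≠ [] := by rintro rfl; simp [PySem.Chars.endswith] at h
  have : 0 < t.length := List.length_pos_iff.mpr ht
  omega

def get_parent_band_name_alt (s : String) : Option String :=
  if s = "" then none
  else some (String.ofList (pvStripDots (PySem.List.slice s.toList none (some (-1)))))

-- ===== PRECONDITION & SPEC =====
def Spec_get_parent_band_name (s : String) (out : Option String) : Prop := out = get_parent_band_name_alt s
instance (s : String) (out : Option String) : Decidable (Spec_get_parent_band_name s out) := by unfold Spec_get_parent_band_name; infer_instance

-- ===== CLAIM (what is proved, stated in full; the proofs are below) =====
def Claim_equal_get_parent_band_name : Prop := ∀ (s : String), Dom_get_parent_band_name s → Spec_get_parent_band_name s (get_parent_band_name s)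

-- ===== LEMMAS AND PROOFS =====

theorem pvStripDots_nil : pvStripDots [] = [] := by
  unfold pvStripDots; simp [PySem.Chars.endswith]

theorem pvGetA_eq (n : Nat) : ∀ l : List Char, l.length ≤ n → l ≠ [] →
    pvGetA l = some (pvStripDots l.dropLast) := by
  induction n with
  | zero =>
    intro l hlen hne
    exact absurd (List.eq_nil_of_length_eq_zero (Nat.le_zero.mp hlen)) hne
  | succ n ih =>
    intro l hlen hne
    rw [pvGetA]
    simp only [if_neg hne, PySem.List.slice_zero_start, PySem.List.slice_to_neg_one]
    by_cases h2 : l.dropLast = []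
    · simp [h2, pvStripDots_nil]
    · simp only [if_neg h2]
      by_cases hdot : PySem.Chars.endswith l.dropLast ['.'] = true
      · simp only [hdot, if_pos]
        have hlen2 : l.dropLast.length ≤ n := by
          have : 0 < l.length := List.length_pos_iff.mpr hne
          simp only [List.length_dropLast]; omega
        rw [ih l.dropLast hlen2 h2]
        conv_rhs => rw [pvStripDots]
        simp [hdot, PySem.List.slice_to_neg_one]
      · rw [if_neg hdot]
        conv_rhs => rw [pvStripDots]
        simp [hdot]

-- ===== VERDICT (by name: the statement is the Claim_ definition above) =====
theorem get_parent_band_name_spec : Claim_equal_get_parent_band_name := by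
  intro s _
  unfold Spec_get_parent_band_name get_parent_band_name get_parent_band_name_alt
  by_cases hs : s = ""
  · subst hs; simp [pvGetA]
  · have hl : s.toList ≠ [] := by
      intro h
      exact hs (by simpa using congrArg String.ofList h)
    rw [pvGetA_eq s.toList.length s.toList le_rfl hl]
    simp [hs, PySem.List.slice_to_neg_one]
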